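-- pv_equiv track=rewrite | github.com/WoutervdW/Ordina-Pubquiz | app/line_segmentation_temp.py | find_corners_contour
-- ===== SOURCE A (Python) =====
-- import operator
--
-- def find_corners_contour(polygon, width=0, add_x=False):
--     """
--     returns the 4 corners of the given polygon.
--     If the points are within a certain range we will save it
--     """
--     bottom_right, _ = max(enumerate([pt[0][0] + pt[0][1] for pt in polygon]), key=operator.itemgetter(1))
--     top_left, _ = min(enumerate([pt[0][0] + pt[0][1] for pt in polygon]), key=operator.itemgetter(1))
--     bottom_left, _ = min(enumerate([pt[0][0] - pt[0][1] for pt in polygon]), key=operator.itemgetter(1))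
--     top_right, _ = max(enumerate([pt[0][0] - pt[0][1] for pt in polygon]), key=operator.itemgetter(1))
--
--     if add_x:
--         # TODO Make the (width-700) a bit more nicer (if you change it in 1 place you might forget it here)
--         polygon[top_left][0][0] = polygon[top_left][0][0] + (width - 700)
--         polygon[top_right][0][0] = polygon[top_right][0][0] + (width - 700)
--         polygon[bottom_right][0][0] = polygon[bottom_right][0][0] + (width - 700)
--         polygon[bottom_left][0][0] = polygon[bottom_left][0][0] + (width - 700)
--
--     return [polygon[top_left][0], polygon[top_right][0], polygon[bottom_right][0], polygon[bottom_left][0]]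
-- ===== SOURCE B (Python) =====
-- def find_corners_contour(polygon, width=0, add_x=False):
--     """
--     Single pass over the contour: maintain all four extremal corner indices
--     (max/min of x+y and x-y) in one loop instead of four separate scans.
--     Mutates polygon in place when add_x, exactly like the original.
--     """
--     x0, y0 = polygon[0][0][0], polygon[0][0][1]
--     max_s = min_s = x0 + y0
--     max_d = min_d = x0 - y0
--     bottom_right = top_left = top_right = bottom_left = 0
--     for i, pt in enumerate(polygon):
--         x, y = pt[0][0], pt[0][1]
--         s, d = x + y, x - y
--         if s > max_s:
--             max_s, bottom_right = s, i
--         if s < min_s: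
--             min_s, top_left = s, i
--         if d > max_d:
--             max_d, top_right = d, i
--         if d < min_d:
--             min_d, bottom_left = d, i
--     corners = [top_left, top_right, bottom_right, bottom_left]
--     if add_x:
--         for i in corners:
--             polygon[i][0][0] += width - 700
--     return [polygon[i][0] for i in corners]
-- ===== Notes on version B (the rewrite author's own statement) =====
-- stated objective: simpler
-- what changed: Replaces the four separate max/min-over-enumerate scans (each rebuilding a key list) with one loop over the polygon that maintains all four extremal corner indices at once, with strict comparisons preserving first-occurrence tie-breaking.
import Mathlib
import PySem

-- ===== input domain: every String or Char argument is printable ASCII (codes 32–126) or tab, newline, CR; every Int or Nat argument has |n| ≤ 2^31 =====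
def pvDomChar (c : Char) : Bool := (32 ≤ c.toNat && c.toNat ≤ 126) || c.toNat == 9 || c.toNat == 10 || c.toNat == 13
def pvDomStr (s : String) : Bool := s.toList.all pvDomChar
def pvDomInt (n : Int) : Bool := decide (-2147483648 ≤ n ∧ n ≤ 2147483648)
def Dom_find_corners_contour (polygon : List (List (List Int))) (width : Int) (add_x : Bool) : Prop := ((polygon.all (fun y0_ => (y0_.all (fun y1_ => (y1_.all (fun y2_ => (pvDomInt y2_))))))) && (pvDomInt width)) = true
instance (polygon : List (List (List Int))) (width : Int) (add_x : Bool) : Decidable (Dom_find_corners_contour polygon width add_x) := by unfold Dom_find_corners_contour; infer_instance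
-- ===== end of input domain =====

-- B folds one combined pass over enumerate(polygon) instead of A's four max/min scans;
-- both mutate polygon the same way when add_x, and the theorems are about the return value.

-- ===== PORT A =====
-- pt[0][0] + pt[0][1]  (the key of A's max/min scans over x+y)
def pvKeyS (pt : List (List Int)) : Int :=
  PySem.List.pyGetD (PySem.List.pyGetD pt 0 []) 0 0 + PySem.List.pyGetD (PySem.List.pyGetD pt 0 []) 1 0

-- pt[0][0] - pt[0][1]
def pvKeyD (pt : List (List Int)) : Int :=
  PySem.List.pyGetD (PySem.List.pyGetD pt 0 []) 0 0 - PySem.List.pyGetD (PySem.List.pyGetD pt 0 []) 1 0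

-- max(enumerate(xs), key=itemgetter(1))[0]: first index of the maximum (Python keeps the earlier item on ties)
def pvArgmax (xs : List Int) : Int :=
  match PySem.List.enumerate xs 0 with
  | [] => 0   -- unreachable under Pre_ (Python max raises ValueError on an empty sequence)
  | h :: t => (t.foldl (fun b x => if x.2 > b.2 then x else b) h).1

-- min(enumerate(xs), key=itemgetter(1))[0]
def pvArgmin (xs : List Int) : Int :=
  match PySem.List.enumerate xs 0 with
  | [] => 0   -- unreachable under Pre_
  | h :: t => (t.foldl (fun b x => if x.2 < b.2 then x else b) h).1

-- the statement 'polygon[i][0][0] = polygon[i][0][0] + (width - 700)' (identical in A and B)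
def pvAddW (poly : List (List (List Int))) (i width : Int) : List (List (List Int)) :=
  let pt := PySem.List.pyGetD poly i []
  let row := PySem.List.pyGetD pt 0 []
  PySem.List.pySetD poly i (PySem.List.pySetD pt 0 (PySem.List.pySetD row 0 (PySem.List.pyGetD row 0 0 + (width - 700))))

def find_corners_contour (polygon : List (List (List Int))) (width : Int) (add_x : Bool) : List (List Int) :=
  let bottom_right := pvArgmax (polygon.map pvKeyS)
  let top_left := pvArgmin (polygon.map pvKeyS)
  let bottom_left := pvArgmin (polygon.map pvKeyD)
  let top_right := pvArgmax (polygon.map pvKeyD)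
  let poly := if add_x then
      pvAddW (pvAddW (pvAddW (pvAddW polygon top_left width) top_right width) bottom_right width) bottom_left width
    else polygon
  [PySem.List.pyGetD (PySem.List.pyGetD poly top_left []) 0 [],
   PySem.List.pyGetD (PySem.List.pyGetD poly top_right []) 0 [],
   PySem.List.pyGetD (PySem.List.pyGetD poly bottom_right []) 0 [],
   PySem.List.pyGetD (PySem.List.pyGetD poly bottom_left []) 0 []]

-- ===== PORT B =====
-- loop body: state ((max_s, bottom_right), (min_s, top_left), (max_d, top_right), (min_d, bottom_left))
def pvStep (st : (Int × Int) × (Int × Int) × (Int × Int) × (Int × Int)) (ip : Int × List (List Int)) :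
    (Int × Int) × (Int × Int) × (Int × Int) × (Int × Int) :=
  let x := PySem.List.pyGetD (PySem.List.pyGetD ip.2 0 []) 0 0
  let y := PySem.List.pyGetD (PySem.List.pyGetD ip.2 0 []) 1 0
  let s := x + y
  let d := x - y
  ((if s > st.1.1 then (s, ip.1) else st.1),
   (if s < st.2.1.1 then (s, ip.1) else st.2.1),
   (if d > st.2.2.1.1 then (d, ip.1) else st.2.2.1),
   (if d < st.2.2.2.1 then (d, ip.1) else st.2.2.2))

def find_corners_contour_alt (polygon : List (List (List Int))) (width : Int) (add_x : Bool) : List (List Int) :=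
  match polygon with
  | [] => []   -- unreachable under Pre_ (polygon[0] raises IndexError in Python)
  | p0 :: _ =>
    let x0 := PySem.List.pyGetD (PySem.List.pyGetD p0 0 []) 0 0
    let y0 := PySem.List.pyGetD (PySem.List.pyGetD p0 0 []) 1 0
    let st := (PySem.List.enumerate polygon 0).foldl pvStep ((x0 + y0, 0), (x0 + y0, 0), (x0 - y0, 0), (x0 - y0, 0))
    let corners := [st.2.1.2, st.2.2.1.2, st.1.2, st.2.2.2.2]
    let poly := if add_x then corners.foldl (fun p i => pvAddW p i width) polygon else polygon
    corners.map (fun i => PySem.List.pyGetD (PySem.List.pyGetD poly i []) 0 [])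

-- ===== PRECONDITION & SPEC =====
-- exactly where the Python A returns: a nonempty polygon (max/min of an empty sequence raises
-- ValueError) whose points each have a first row with at least two coordinates (else IndexError)
def Pre_find_corners_contour (polygon : List (List (List Int))) (width : Int) (add_x : Bool) : Prop :=
  polygon ≠ [] ∧ ∀ pt ∈ polygon, pt ≠ [] ∧ 2 ≤ (pt.headD []).length
instance (polygon : List (List (List Int))) (width : Int) (add_x : Bool) : Decidable (Pre_find_corners_contour polygon width add_x) := by unfold Pre_find_corners_contour; infer_instance

def pvWitness_find_corners_contour : List (List (List Int)) × Int × Bool :=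
  ([[[0, 0]], [[3, 1]], [[1, 4]]], 710, true)

def Spec_find_corners_contour (polygon : List (List (List Int))) (width : Int) (add_x : Bool) (out : List (List Int)) : Prop := out = find_corners_contour_alt polygon width add_x
instance (polygon : List (List (List Int))) (width : Int) (add_x : Bool) (out : List (List Int)) : Decidable (Spec_find_corners_contour polygon width add_x out) := by unfold Spec_find_corners_contour; infer_instance

-- ===== CLAIM (what is proved, stated in full; the proofs are below) =====
def Claim_equal_find_corners_contour : Prop := ∀ (polygon : List (List (List Int))) (width : Int) (add_x : Bool), Dom_find_corners_contour polygon width add_x → Pre_find_corners_contour polygon width add_x → Spec_find_corners_contour polygon width add_x (find_corners_contour polygon width add_x)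

-- ===== LEMMAS AND PROOFS =====

-- enumerate commutes with map
theorem pvEnumMap {α β : Type} (f : α → β) (l : List α) (s : Int) :
    PySem.List.enumerate (l.map f) s = (PySem.List.enumerate l s).map (fun ip => (ip.1, f ip.2)) := by
  induction l generalizing s with
  | nil => simp [PySem.List.enumerate_nil]
  | cons h t ih => simp [PySem.List.enumerate_cons, ih]

-- A's (index, key) max-fold is B's (key, index) max-fold, swapped
theorem pvMaxSwap {α : Type} (f : α → Int) (l : List (Int × α)) (i v : Int) :
    (l.map (fun ip => (ip.1, f ip.2))).foldl (fun b x => if x.2 > b.2 then x else b) (i, v)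
      = Prod.swap (l.foldl (fun (acc : Int × Int) ip => if f ip.2 > acc.1 then (f ip.2, ip.1) else acc) (v, i)) := by
  induction l generalizing i v with
  | nil => rfl
  | cons h t ih =>
    simp only [List.map_cons, List.foldl_cons]
    by_cases hc : f h.2 > v
    · simp [hc, ih]
    · simp [hc, ih]

theorem pvMinSwap {α : Type} (f : α → Int) (l : List (Int × α)) (i v : Int) :
    (l.map (fun ip => (ip.1, f ip.2))).foldl (fun b x => if x.2 < b.2 then x else b) (i, v)
      = Prod.swap (l.foldl (fun (acc : Int × Int) ip => if f ip.2 < acc.1 then (f ip.2, ip.1) else acc) (v, i)) := by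
  induction l generalizing i v with
  | nil => rfl
  | cons h t ih =>
    simp only [List.map_cons, List.foldl_cons]
    by_cases hc : f h.2 < v
    · simp [hc, ih]
    · simp [hc, ih]

-- B's combined fold splits into four independent folds
theorem pvSplit (l : List (Int × List (List Int))) (a b c d : Int × Int) :
    l.foldl pvStep (a, b, c, d)
      = (l.foldl (fun acc ip => if pvKeyS ip.2 > acc.1 then (pvKeyS ip.2, ip.1) else acc) a,
         l.foldl (fun acc ip => if pvKeyS ip.2 < acc.1 then (pvKeyS ip.2, ip.1) else acc) b,
         l.foldl (fun acc ip => if pvKeyD ip.2 > acc.1 then (pvKeyD ip.2, ip.1) else acc) c,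
         l.foldl (fun acc ip => if pvKeyD ip.2 < acc.1 then (pvKeyD ip.2, ip.1) else acc) d) := by
  induction l generalizing a b c d with
  | nil => rfl
  | cons h t ih => simp only [List.foldl_cons, pvStep, pvKeyS, pvKeyD, ih]

-- A's argmax over the mapped key list, in B's fold shape
theorem pvArgmaxEq (f : List (List Int) → Int) (p0 : List (List Int)) (rest : List (List (List Int))) :
    pvArgmax ((p0 :: rest).map f)
      = ((PySem.List.enumerate rest 1).foldl
          (fun (acc : Int × Int) ip => if f ip.2 > acc.1 then (f ip.2, ip.1) else acc) (f p0, 0)).2 := by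
  simp only [pvArgmax, pvEnumMap, PySem.List.enumerate_cons, List.map_cons, zero_add]
  rw [pvMaxSwap]
  rfl

theorem pvArgminEq (f : List (List Int) → Int) (p0 : List (List Int)) (rest : List (List (List Int))) :
    pvArgmin ((p0 :: rest).map f)
      = ((PySem.List.enumerate rest 1).foldl
          (fun (acc : Int × Int) ip => if f ip.2 < acc.1 then (f ip.2, ip.1) else acc) (f p0, 0)).2 := by
  simp only [pvArgmin, pvEnumMap, PySem.List.enumerate_cons, List.map_cons, zero_add]
  rw [pvMinSwap]
  rfl

-- ===== VERDICT (by name: the statement is the Claim_ definition above) =====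
theorem find_corners_contour_spec : Claim_equal_find_corners_contour := by
  intro polygon width add_x _ hPre
  unfold Spec_find_corners_contour
  obtain ⟨hne, -⟩ := hPre
  obtain ⟨p0, rest, rfl⟩ : ∃ p0 rest, polygon = p0 :: rest := by
    cases polygon with
    | nil => exact absurd rfl hne
    | cons a l => exact ⟨a, l, rfl⟩
  show find_corners_contour (p0 :: rest) width add_x = _
  simp only [find_corners_contour, find_corners_contour_alt]
  rw [pvArgmaxEq pvKeyS p0 rest, pvArgminEq pvKeyS p0 rest,
      pvArgmaxEq pvKeyD p0 rest, pvArgminEq pvKeyD p0 rest]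
  simp [PySem.List.enumerate_cons, pvSplit, pvStep, pvKeyS, pvKeyD]
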